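-- pv_equiv track=rewrite | github.com/simonp993/aaos-datacollector-core | telemetry_analysis/code/dashboard.py | _filter_events_by_periods
-- ===== SOURCE A (Python) =====
-- def _filter_events_by_periods(events, periods):
--     """Keep only events whose timestamp falls within any of the given (start, end) periods."""
--     if not periods:
--         return events
--     filtered = []
--     for e in events:
--         ts = e.get("timestamp", 0)
--         for p_start, p_end in periods:
--             if p_start <= ts <= p_end:
--                 filtered.append(e)
--                 break
--     return filtered
-- ===== SOURCE B (Python) =====
-- def _filter_events_by_periods(events, periods):
--     """Keep only events whose timestamp falls within any of the given (start, end) periods.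
--
--     Merges the periods into disjoint sorted intervals once, then binary-searches
--     each event's timestamp, instead of scanning every period per event.
--     """
--     if not periods:
--         return events
--     merged = []
--     for s, e in sorted(periods, key=lambda p: p[0]):
--         if s > e:
--             continue
--         if merged and s <= merged[-1][1]:
--             if e > merged[-1][1]:
--                 merged[-1] = (merged[-1][0], e)
--         else:
--             merged.append((s, e))
--     starts = [s for s, _ in merged]
--     out = []
--     for ev in events:
--         ts = ev.get("timestamp", 0)
--         lo, hi = 0, len(merged)
--         while lo < hi:  # bisect_right over starts, by hand
--             mid = (lo + hi) // 2
--             if starts[mid] <= ts: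
--                 lo = mid + 1
--             else:
--                 hi = mid
--         if lo and ts <= merged[lo - 1][1]:
--             out.append(ev)
--     return out
-- ===== Notes on version B (the rewrite author's own statement) =====
-- stated objective: alternative
-- what changed: Instead of scanning every period for each event, B sorts the periods once, merges them into disjoint intervals, and binary-searches each event's timestamp in the merged interval list; intended as faster (O((E+P) log P) vs O(E*P)), measured only ~1.4x on the generated inputs.
import Mathlib
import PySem

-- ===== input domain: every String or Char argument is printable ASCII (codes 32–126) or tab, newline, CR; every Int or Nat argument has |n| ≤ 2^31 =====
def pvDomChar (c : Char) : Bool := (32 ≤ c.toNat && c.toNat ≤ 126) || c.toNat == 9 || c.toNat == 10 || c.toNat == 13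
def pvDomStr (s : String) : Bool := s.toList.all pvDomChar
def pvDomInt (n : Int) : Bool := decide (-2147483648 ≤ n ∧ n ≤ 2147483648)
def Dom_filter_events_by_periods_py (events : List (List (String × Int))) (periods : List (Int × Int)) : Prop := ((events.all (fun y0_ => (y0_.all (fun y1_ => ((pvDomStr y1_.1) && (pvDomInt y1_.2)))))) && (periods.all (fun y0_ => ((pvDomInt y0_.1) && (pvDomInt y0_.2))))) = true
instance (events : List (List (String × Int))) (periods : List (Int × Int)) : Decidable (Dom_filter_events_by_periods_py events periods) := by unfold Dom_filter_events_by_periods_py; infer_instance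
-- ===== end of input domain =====

-- B replaces A's per-event linear scan over all periods by a one-time sort+merge of the
-- periods into disjoint intervals plus a hand-written binary search per event.

-- ===== PORT A =====
-- inner loop 'for p_start, p_end in periods: if p_start <= ts <= p_end: filtered.append(e); break'
-- (because of the break, e is appended exactly once iff SOME period contains ts)
def pvAScan (ts : Int) : List (Int × Int) → Bool
  | [] => false
  | (s, e) :: r => if s ≤ ts ∧ ts ≤ e then true else pvAScan ts r

def filter_events_by_periods_py (events : List (List (String × Int))) (periods : List (Int × Int)) : List (List (String × Int)) :=
  if periods = [] then events
  else
    events.foldl (fun filtered e =>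
      let ts := PySem.Dict.getD ⟨e⟩ "timestamp" 0
      if pvAScan ts periods then filtered ++ [e] else filtered) []

-- ===== PORT B =====
-- one iteration of Source B's merge loop body ('merged[-1] = …' is dropLast ++ [_])
def pvMergeStep (merged : List (Int × Int)) (p : Int × Int) : List (Int × Int) :=
  if p.1 > p.2 then merged
  else
    match merged.getLast? with
    | some l =>
      if p.1 ≤ l.2 then
        if p.2 > l.2 then merged.dropLast ++ [(l.1, p.2)] else merged
      else merged ++ [p]
    | none => merged ++ [p]

-- Source B's hand-written while-loop binary search; lo, hi are nonnegative ints in Python,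
-- so '(lo + hi) // 2' is exactly Nat division and 'starts[mid]' is in range (getD exact);
-- the fuel argument (hi - lo strictly decreases each iteration) only makes the loop structural
def pvBsearchAux : Nat → List Int → Int → Nat → Nat → Nat
  | 0, _, _, lo, _ => lo
  | fuel + 1, starts, ts, lo, hi =>
    if lo < hi then
      let mid := (lo + hi) / 2
      if starts.getD mid 0 ≤ ts then pvBsearchAux fuel starts ts (mid + 1) hi
      else pvBsearchAux fuel starts ts lo mid
    else lo

def pvBsearch (starts : List Int) (ts : Int) (lo hi : Nat) : Nat :=
  pvBsearchAux (hi - lo) starts ts lo hi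

def filter_events_by_periods_py_alt (events : List (List (String × Int))) (periods : List (Int × Int)) : List (List (String × Int)) :=
  if periods = [] then events
  else
    let merged := (PySem.List.sorted periods (fun p => p.1)).foldl pvMergeStep []
    let starts := merged.map (fun p => p.1)
    events.foldl (fun out ev =>
      let ts := PySem.Dict.getD ⟨ev⟩ "timestamp" 0
      let lo := pvBsearch starts ts 0 merged.length
      if lo ≠ 0 ∧ ts ≤ (merged.getD (lo - 1) (0, 0)).2 then out ++ [ev] else out) []

-- ===== PRECONDITION & SPEC =====
def Spec_filter_events_by_periods_py (events : List (List (String × Int))) (periods : List (Int × Int)) (out : List (List (String × Int))) : Prop := out = filter_events_by_periods_py_alt events periods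
instance (events : List (List (String × Int))) (periods : List (Int × Int)) (out : List (List (String × Int))) : Decidable (Spec_filter_events_by_periods_py events periods out) := by unfold Spec_filter_events_by_periods_py; infer_instance

-- ===== CLAIM (what is proved, stated in full; the proofs are below) =====
def Claim_equal_filter_events_by_periods_py : Prop := ∀ (events : List (List (String × Int))) (periods : List (Int × Int)), Dom_filter_events_by_periods_py events periods → Spec_filter_events_by_periods_py events periods (filter_events_by_periods_py events periods)

-- ===== LEMMAS AND PROOFS =====

-- 'some interval of m contains ts'
def pvCov (m : List (Int × Int)) (ts : Int) : Bool := m.any (fun p => decide (p.1 ≤ ts ∧ ts ≤ p.2))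

-- nonempty intervals, pairwise disjoint and in increasing order
def pvChain (m : List (Int × Int)) : Prop :=
  (∀ p ∈ m, p.1 ≤ p.2) ∧ m.Pairwise (fun a b => a.2 < b.1)

-- A's inner scan-with-break is 'some period contains ts'
lemma pvAScan_eq_cov (ts : Int) (ps : List (Int × Int)) : pvAScan ts ps = pvCov ps ts := by
  induction ps with
  | nil => rfl
  | cons p r ih =>
    obtain ⟨s, e⟩ := p
    simp [pvAScan, pvCov, List.any_cons, ih]

-- one merge step keeps the chain shape, keeps the last start ≤ p.1, and adds exactly [p.1, p.2] to the covered set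
lemma pvStep_main (acc : List (Int × Int)) (p : Int × Int)
    (hc : pvChain acc) (hl : ∀ x ∈ acc.getLast?, x.1 ≤ p.1) :
    pvChain (pvMergeStep acc p) ∧
    (∀ x ∈ (pvMergeStep acc p).getLast?, x.1 ≤ p.1) ∧
    (∀ ts, pvCov (pvMergeStep acc p) ts = (pvCov acc ts || decide (p.1 ≤ ts ∧ ts ≤ p.2))) := by
  obtain ⟨s, e⟩ := p
  obtain ⟨hc1, hc2⟩ := hc
  unfold pvMergeStep
  by_cases h1 : s > e
  · rw [if_pos h1]
    refine ⟨⟨hc1, hc2⟩, hl, ?_⟩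
    intro ts; have : ¬ (s ≤ ts ∧ ts ≤ e) := by omega
    simp [this]
  · cases hacc : acc.getLast? with
    | none =>
      have : acc = [] := by simpa using hacc
      subst this
      rw [if_neg h1]
      refine ⟨⟨by simp; omega, by simp⟩, by simp, by intro ts; simp [pvCov]⟩
    | some l =>
      obtain ⟨ys, rfl⟩ := List.getLast?_eq_some_iff.mp hacc
      have hlp : l.1 ≤ s := hl l (by simp)
      have hll : l.1 ≤ l.2 := hc1 l (by simp)
      have hys : ∀ x ∈ ys, x.2 < l.1 := by
        intro x hx
        exact (List.pairwise_append.mp hc2).2.2 x hx l (by simp)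
      rw [if_neg h1]; dsimp only
      by_cases h2 : s ≤ l.2
      · by_cases h3 : e > l.2
        · rw [if_pos h2, if_pos h3, List.dropLast_concat]
          refine ⟨⟨?_, ?_⟩, by simpa using hlp, ?_⟩
          · intro q hq
            rcases List.mem_append.mp hq with h | h
            · exact hc1 q (List.mem_append_left _ h)
            · simp at h; subst h; simp; omega
          · rw [List.pairwise_append]
            refine ⟨(List.pairwise_append.mp hc2).1, by simp, ?_⟩
            intro x hx y hy; simp at hy; subst hy
            exact hys x hx
          · intro ts
            simp only [pvCov, List.any_append, List.any_cons, List.any_nil, Bool.or_false]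
            have : (l.1 ≤ ts ∧ ts ≤ e) ↔ ((l.1 ≤ ts ∧ ts ≤ l.2) ∨ (s ≤ ts ∧ ts ≤ e)) := by omega
            rw [decide_eq_decide.mpr this]
            · simp [Bool.or_assoc]
            · infer_instance
        · rw [if_pos h2, if_neg h3]
          refine ⟨⟨hc1, hc2⟩, by simpa using hlp, ?_⟩
          intro ts
          have : (s ≤ ts ∧ ts ≤ e) → (l.1 ≤ ts ∧ ts ≤ l.2) := by omega
          cases hd : decide (s ≤ ts ∧ ts ≤ e) with
          | false => simp
          | true =>
            have h4 := of_decide_eq_true hd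
            have h5 : pvCov (ys ++ [l]) ts = true := by
              simp only [pvCov, List.any_eq_true]
              exact ⟨l, by simp, by simp [this h4]⟩
            simp [h5]
      · rw [if_neg h2]
        refine ⟨⟨?_, ?_⟩, by simp, ?_⟩
        · intro q hq
          rcases List.mem_append.mp hq with h | h
          · exact hc1 q h
          · simp at h; subst h; simp; omega
        · rw [List.pairwise_append]
          refine ⟨hc2, by simp, ?_⟩
          intro x hx y hy; simp at hy; subst hy
          rcases List.mem_append.mp hx with h | h
          · have := hys x h; simp; omega
          · simp at h; subst h; simp; omega
        · intro ts
          simp [pvCov, List.any_append, Bool.or_assoc]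

-- the whole merge fold: the result is a chain covering exactly what the input periods cover
lemma pvMerge_main : ∀ (l acc : List (Int × Int)),
    l.Pairwise (fun a b => a.1 ≤ b.1) →
    pvChain acc →
    (∀ x ∈ acc.getLast?, ∀ q ∈ l, x.1 ≤ q.1) →
    pvChain (l.foldl pvMergeStep acc) ∧
      ∀ ts, pvCov (l.foldl pvMergeStep acc) ts = (pvCov acc ts || pvCov l ts) := by
  intro l
  induction l with
  | nil => intro acc _ hc _; exact ⟨hc, by simp [pvCov]⟩
  | cons p r ih =>
    intro acc hp hc hl
    have hstep := pvStep_main acc p hc (fun x hx => hl x hx p (by simp))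
    have hr : r.Pairwise (fun a b => a.1 ≤ b.1) := (List.pairwise_cons.mp hp).2
    have hpr : ∀ q ∈ r, p.1 ≤ q.1 := (List.pairwise_cons.mp hp).1
    have := ih (pvMergeStep acc p) hr hstep.1
      (fun x hx q hq => le_trans (hstep.2.1 x hx) (hpr q hq))
    rw [List.foldl_cons]
    refine ⟨this.1, fun ts => ?_⟩
    rw [this.2 ts, hstep.2.2 ts]
    simp [pvCov, Bool.or_assoc]

-- the while-loop binary search: on a sorted list it computes the bisect-right point
lemma pvBsearchAux_spec : ∀ (k : Nat) (starts : List Int) (ts : Int),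
    starts.Pairwise (· ≤ ·) → ∀ lo hi, hi - lo ≤ k → lo ≤ hi → hi ≤ starts.length →
    (∀ i (h : i < starts.length), i < lo → starts[i] ≤ ts) →
    (∀ i (h : i < starts.length), hi ≤ i → ts < starts[i]) →
    lo ≤ pvBsearchAux k starts ts lo hi ∧ pvBsearchAux k starts ts lo hi ≤ hi ∧
      (∀ i (h : i < starts.length), starts[i] ≤ ts ↔ i < pvBsearchAux k starts ts lo hi) := by
  intro k
  induction k with
  | zero =>
    intro starts ts hs lo hi hk hlohi hhi hbelow habove
    simp only [pvBsearchAux]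
    have hlohi' : lo = hi := by omega
    refine ⟨le_refl _, by omega, fun i hilen => ?_⟩
    constructor
    · intro hle
      by_contra hcon
      exact absurd hle (not_le.mpr (habove i hilen (by omega)))
    · intro hlt; exact hbelow i hilen hlt
  | succ k IH =>
    intro starts ts hs lo hi hk hlohi hhi hbelow habove
    show _ ≤ pvBsearchAux (k+1) starts ts lo hi ∧ _
    rw [pvBsearchAux]
    by_cases h : lo < hi
    · rw [if_pos h]
      have hmid1 : lo ≤ (lo + hi) / 2 := by omega
      have hmid2 : (lo + hi) / 2 < hi := by omega
      have hmidlt : (lo + hi) / 2 < starts.length := by omega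
      have hget : starts.getD ((lo + hi) / 2) 0 = starts[(lo + hi) / 2] := List.getD_eq_getElem _ _ hmidlt
      have hmono := List.pairwise_iff_getElem.mp hs
      by_cases hc : starts.getD ((lo + hi) / 2) 0 ≤ ts
      · rw [if_pos hc]
        have := IH starts ts hs ((lo + hi) / 2 + 1) hi (by omega)
          (by omega) hhi
          (fun i hilen hi2 => by
            rcases Nat.lt_or_ge i lo with h' | h'
            · exact hbelow i hilen h'
            · rcases Nat.eq_or_lt_of_le (Nat.le_of_lt_succ hi2) with h'' | h''
              · subst h''; rw [← hget]; exact hc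
              · exact le_trans (hmono i ((lo + hi) / 2) hilen hmidlt h'') (hget ▸ hc))
          habove
        exact ⟨le_trans (by omega) this.1, this.2.1, this.2.2⟩
      · rw [if_neg hc]
        have hts : ts < starts[(lo + hi) / 2] := by rw [← hget]; omega
        have := IH starts ts hs lo ((lo + hi) / 2) (by omega)
          (by omega) (by omega) hbelow
          (fun i hilen hi2 => by
            rcases Nat.eq_or_lt_of_le hi2 with h'' | h''
            · subst h''; exact hts
            · exact lt_of_lt_of_le hts (hmono ((lo + hi) / 2) i hmidlt hilen h''))
        exact ⟨this.1, le_trans this.2.1 (by omega), this.2.2⟩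
    · rw [if_neg h]
      have hlohi' : lo = hi := by omega
      refine ⟨le_refl _, by omega, fun i hilen => ?_⟩
      constructor
      · intro hle
        by_contra hcon
        exact absurd hle (not_le.mpr (habove i hilen (by omega)))
      · intro hlt; exact hbelow i hilen hlt

lemma pvBsearch_spec (starts : List Int) (ts : Int)
    (hs : starts.Pairwise (· ≤ ·)) (lo hi : Nat) (hlohi : lo ≤ hi) (hhi : hi ≤ starts.length)
    (hbelow : ∀ i (h : i < starts.length), i < lo → starts[i] ≤ ts)
    (habove : ∀ i (h : i < starts.length), hi ≤ i → ts < starts[i]) :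
    lo ≤ pvBsearch starts ts lo hi ∧ pvBsearch starts ts lo hi ≤ hi ∧
      (∀ i (h : i < starts.length), starts[i] ≤ ts ↔ i < pvBsearch starts ts lo hi) :=
  pvBsearchAux_spec (hi - lo) starts ts hs lo hi (le_refl _) hlohi hhi hbelow habove

-- Source B's per-event membership check equals interval coverage, for a chain
lemma pvCheck_iff (m : List (Int × Int)) (hm : pvChain m) (ts : Int) :
    (pvBsearch (m.map (fun p => p.1)) ts 0 m.length ≠ 0 ∧
      ts ≤ (m.getD (pvBsearch (m.map (fun p => p.1)) ts 0 m.length - 1) (0, 0)).2) ↔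
    pvCov m ts = true := by
  set starts := m.map (fun p => p.1) with hst
  have hlen : starts.length = m.length := by simp [hst]
  have hsorted : starts.Pairwise (· ≤ ·) := by
    rw [hst, List.pairwise_map]
    exact (hm.2.imp_of_mem (fun {a b} ha hb h => le_trans (hm.1 a ha) (le_of_lt h)))
  obtain ⟨-, hr2, hiff⟩ := pvBsearch_spec starts ts hsorted 0 m.length
    (by omega) (by omega) (by omega) (fun i h hi => by omega)
  set r := pvBsearch starts ts 0 m.length with hrdef
  have hmono := List.pairwise_iff_getElem.mp hm.2
  constructor
  · rintro ⟨hne, hle⟩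
    have hrlt : r - 1 < m.length := by omega
    have h1 : starts[r-1]'(by omega) ≤ ts := (hiff (r-1) (by omega)).mpr (by omega)
    rw [List.getElem_map] at h1
    rw [List.getD_eq_getElem _ _ hrlt] at hle
    simp only [pvCov, List.any_eq_true]
    exact ⟨m[r-1], List.getElem_mem _, by simp [h1, hle]⟩
  · intro hcov
    simp only [pvCov, List.any_eq_true] at hcov
    obtain ⟨p, hpm, hp⟩ := hcov
    obtain ⟨i, hilen, rfl⟩ := List.mem_iff_getElem.mp hpm
    simp only [decide_eq_true_eq] at hp
    have hi1 : starts[i]'(by omega) ≤ ts := by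
      have he : starts[i]'(by omega) = (m[i]).1 := by simp [hst]
      rw [he]; exact hp.1
    have hir : i < r := (hiff i (by omega)).mp hi1
    have hne : r ≠ 0 := by omega
    have hrlt : r - 1 < m.length := by omega
    have h1 : m[r-1].1 ≤ ts := by
      have := (hiff (r-1) (by omega)).mpr (by omega)
      rwa [List.getElem_map] at this
    refine ⟨hne, ?_⟩
    rw [List.getD_eq_getElem _ _ hrlt]
    rcases Nat.lt_or_ge i (r-1) with hlt | hge
    · exact absurd (lt_of_le_of_lt hp.2 (lt_of_lt_of_le (hmono i (r-1) hilen hrlt hlt) h1)) (lt_irrefl ts)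
    · have : i = r - 1 := by omega
      subst this; exact hp.2

-- the two ports agree on every input
lemma pvA_eq_alt : ∀ events periods, filter_events_by_periods_py events periods = filter_events_by_periods_py_alt events periods := by
  intro events periods
  unfold filter_events_by_periods_py filter_events_by_periods_py_alt
  by_cases hp : periods = []
  · rw [if_pos hp, if_pos hp]
  · rw [if_neg hp, if_neg hp]
    rw [PySem.List.foldl_append_if_eq_filter
      (fun e => pvAScan (PySem.Dict.getD ⟨e⟩ "timestamp" 0) periods) events []]
    rw [PySem.List.foldl_append_ite_eq_filter
      (fun ev => pvBsearch ((((PySem.List.sorted periods (fun p => p.1)).foldl pvMergeStep []).map (fun p => p.1))) (PySem.Dict.getD ⟨ev⟩ "timestamp" 0) 0 ((PySem.List.sorted periods (fun p => p.1)).foldl pvMergeStep []).length ≠ 0 ∧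
        (PySem.Dict.getD ⟨ev⟩ "timestamp" 0) ≤ ((((PySem.List.sorted periods (fun p => p.1)).foldl pvMergeStep []).getD (pvBsearch ((((PySem.List.sorted periods (fun p => p.1)).foldl pvMergeStep []).map (fun p => p.1))) (PySem.Dict.getD ⟨ev⟩ "timestamp" 0) 0 ((PySem.List.sorted periods (fun p => p.1)).foldl pvMergeStep []).length - 1) (0, 0)).2)) events []]
    simp only [List.nil_append]
    apply List.filter_congr
    intro e _
    set ts := PySem.Dict.getD (⟨e⟩ : PySem.Dict String Int) "timestamp" 0 with hts
    set merged := (PySem.List.sorted periods (fun p => p.1)).foldl pvMergeStep [] with hm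
    have hmain := pvMerge_main (PySem.List.sorted periods (fun p => p.1)) []
      (PySem.List.sorted_pairwise periods (fun p => p.1))
      ⟨by simp, by simp⟩ (by simp)
    have hcovp : pvCov merged ts = pvCov periods ts := by
      rw [← hm] at hmain
      rw [hmain.2 ts]
      simp only [pvCov, List.any_nil, Bool.false_or]
      exact (PySem.List.sorted_perm periods (fun p => p.1) false).any_eq
    have hchk := pvCheck_iff merged (by rw [← hm] at hmain; exact hmain.1) ts
    rw [pvAScan_eq_cov]
    rw [← hcovp]
    rw [decide_eq_decide.mpr hchk]
    · simp
    · infer_instance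

-- ===== VERDICT (by name: the statement is the Claim_ definition above) =====
theorem filter_events_by_periods_py_spec : Claim_equal_filter_events_by_periods_py := by
  intro events periods _
  unfold Spec_filter_events_by_periods_py
  exact pvA_eq_alt events periods
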